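-- pv_equiv track=rewrite | github.com/harshpan/aws-parallelcluster | util/generate-ami-list.py | convert_json_to_txt
-- ===== SOURCE A (Python) =====
-- from collections import OrderedDict
--
-- distros = OrderedDict(
--     [
--         ("alinux", "amzn"),
--         ("centos6", "centos6"),
--         ("centos7", "centos7"),
--         ("ubuntu1404", "ubuntu-1404"),
--         ("ubuntu1604", "ubuntu-1604"),
--     ]
-- )
--
-- def convert_json_to_txt(amis_json):
--     amis_txt = ""
--     for key, value in distros.items():
--         amis_txt += "# " + key + "\n"
--         for region, amis in amis_json.items():
--             if key in amis:
--                 amis_txt += region + ": " + amis[key] + "\n"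
--
--     return amis_txt
-- ===== SOURCE B (Python) =====
-- from collections import OrderedDict
--
-- distros = OrderedDict(
--     [
--         ("alinux", "amzn"),
--         ("centos6", "centos6"),
--         ("centos7", "centos7"),
--         ("ubuntu1404", "ubuntu-1404"),
--         ("ubuntu1604", "ubuntu-1604"),
--     ]
-- )
--
-- def convert_json_to_txt(amis_json):
--     buckets = [(key, []) for key in distros]
--     for region, amis in amis_json.items():
--         for key, lines in buckets:
--             if key in amis:
--                 lines.append(region + ": " + amis[key] + "\n")
--     return "".join("# " + key + "\n" + "".join(lines) for key, lines in buckets)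
-- ===== Notes on version B (the rewrite author's own statement) =====
-- stated objective: alternative
-- what changed: Single bucketing pass over the regions filling per-distro line lists (seeded for all five distro keys), then one table-driven emission pass, instead of A's five repeated scans of the regions dict.
import Mathlib
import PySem

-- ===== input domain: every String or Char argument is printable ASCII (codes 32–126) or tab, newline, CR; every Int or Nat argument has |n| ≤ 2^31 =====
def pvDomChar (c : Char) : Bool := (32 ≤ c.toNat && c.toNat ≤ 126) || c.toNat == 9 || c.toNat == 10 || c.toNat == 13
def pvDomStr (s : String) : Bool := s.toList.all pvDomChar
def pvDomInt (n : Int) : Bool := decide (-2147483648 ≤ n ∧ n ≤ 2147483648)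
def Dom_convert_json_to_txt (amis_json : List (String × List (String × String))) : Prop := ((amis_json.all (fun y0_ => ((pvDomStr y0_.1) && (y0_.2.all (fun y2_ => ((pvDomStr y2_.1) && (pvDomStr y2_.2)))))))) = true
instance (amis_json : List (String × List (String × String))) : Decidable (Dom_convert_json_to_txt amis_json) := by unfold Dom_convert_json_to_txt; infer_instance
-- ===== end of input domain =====

-- B replaces A's five scans of the regions dict by one bucketing pass over the regions plus a
-- table-driven emission pass (objective: alternative; same return value).

-- the distros table (shared constant of the module)
def pvDistros : List (String × String) :=
  [("alinux", "amzn"), ("centos6", "centos6"), ("centos7", "centos7"),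
   ("ubuntu1404", "ubuntu-1404"), ("ubuntu1604", "ubuntu-1604")]

-- Python dict lookup on the association list: 'key in amis' + 'amis[key]' = first match
def pvLookup : List (String × String) → String → Option String
  | [], _ => none
  | p :: rest, k => if p.1 = k then some p.2 else pvLookup rest k

-- ===== PORT A =====
def convert_json_to_txt (amis_json : List (String × List (String × String))) : String :=
  pvDistros.foldl
    (fun amis_txt kv =>
      amis_json.foldl
        (fun acc ra =>
          match pvLookup ra.2 kv.1 with
          | some ami => acc ++ ra.1 ++ ": " ++ ami ++ "\n"
          | none => acc)
        (amis_txt ++ "# " ++ kv.1 ++ "\n"))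
    ""

-- ===== PORT B =====
def convert_json_to_txt_alt (amis_json : List (String × List (String × String))) : String :=
  String.join
    ((amis_json.foldl
        (fun b ra =>
          b.map (fun kl =>
            match pvLookup ra.2 kl.1 with
            | some ami => (kl.1, kl.2 ++ [ra.1 ++ ": " ++ ami ++ "\n"])
            | none => kl))
        (pvDistros.map (fun kv => (kv.1, ([] : List String))))).map
      (fun kl => "# " ++ kl.1 ++ "\n" ++ String.join kl.2))

-- ===== PRECONDITION & SPEC =====
def Spec_convert_json_to_txt (amis_json : List (String × List (String × String))) (out : String) : Prop := out = convert_json_to_txt_alt amis_json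
instance (amis_json : List (String × List (String × String))) (out : String) : Decidable (Spec_convert_json_to_txt amis_json out) := by unfold Spec_convert_json_to_txt; infer_instance

-- ===== CLAIM (what is proved, stated in full; the proofs are below) =====
def Claim_equal_convert_json_to_txt : Prop := ∀ (amis_json : List (String × List (String × String))), Dom_convert_json_to_txt amis_json → Spec_convert_json_to_txt amis_json (convert_json_to_txt amis_json)

-- ===== LEMMAS AND PROOFS =====

-- the lines of one distro group, in amis_json order
def pvLines (k : String) (xs : List (String × List (String × String))) : List String :=
  xs.flatMap (fun ra =>
    match pvLookup ra.2 k with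
    | some ami => [ra.1 ++ ": " ++ ami ++ "\n"]
    | none => [])

theorem pvJoin_cons (s : String) (l : List String) :
    String.join (s :: l) = s ++ String.join l := by
  have aux : ∀ (l : List String) (a : String), l.foldl (· ++ ·) a = a ++ String.join l := by
    intro l
    induction l with
    | nil => intro a; simp [String.join]
    | cons x xs ih =>
      intro a
      simp only [String.join, List.foldl_cons] at *
      rw [ih (a ++ x), ih ("" ++ x)]
      simp [String.append_assoc]
  have h0 : String.join (s :: l) = List.foldl (· ++ ·) ("" ++ s) l := rfl
  rw [h0, aux l ("" ++ s)]
  simp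

theorem pvLines_cons (k : String) (ra : String × List (String × String))
    (xs : List (String × List (String × String))) :
    pvLines k (ra :: xs) =
      (match pvLookup ra.2 k with
       | some ami => [ra.1 ++ ": " ++ ami ++ "\n"]
       | none => []) ++ pvLines k xs := by
  simp [pvLines]

-- A's inner loop over the regions appends exactly the joined group lines
theorem pvA_inner (k : String) (xs : List (String × List (String × String))) (a : String) :
    xs.foldl
      (fun acc ra =>
        match pvLookup ra.2 k with
        | some ami => acc ++ ra.1 ++ ": " ++ ami ++ "\n"
        | none => acc) a
      = a ++ String.join (pvLines k xs) := by
  induction xs generalizing a with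
  | nil => simp [pvLines, String.join]
  | cons ra rest ih =>
    rw [List.foldl_cons, pvLines_cons]
    cases h : pvLookup ra.2 k with
    | none =>
      rw [ih]
      simp
    | some ami =>
      rw [ih, List.singleton_append, pvJoin_cons]
      simp [String.append_assoc]

-- A's outer loop emits header-plus-group for each distro key
theorem pvA_outer (xs : List (String × List (String × String)))
    (ks : List (String × String)) (a : String) :
    ks.foldl
      (fun amis_txt kv =>
        xs.foldl
          (fun acc ra =>
            match pvLookup ra.2 kv.1 with
            | some ami => acc ++ ra.1 ++ ": " ++ ami ++ "\n"
            | none => acc)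
          (amis_txt ++ "# " ++ kv.1 ++ "\n")) a
      = a ++ String.join (ks.map (fun kv => "# " ++ kv.1 ++ "\n" ++ String.join (pvLines kv.1 xs))) := by
  induction ks generalizing a with
  | nil => simp [String.join]
  | cons kv rest ih =>
    rw [List.foldl_cons, pvA_inner, ih, List.map_cons, pvJoin_cons]
    simp [String.append_assoc]

-- B's bucketing pass fills each bucket with exactly its group lines
theorem pvB_fold (xs : List (String × List (String × String)))
    (b : List (String × List String)) :
    xs.foldl
      (fun b ra =>
        b.map (fun kl =>
          match pvLookup ra.2 kl.1 with
          | some ami => (kl.1, kl.2 ++ [ra.1 ++ ": " ++ ami ++ "\n"])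
          | none => kl)) b
      = b.map (fun kl => (kl.1, kl.2 ++ pvLines kl.1 xs)) := by
  induction xs generalizing b with
  | nil =>
    simp [pvLines]
  | cons ra rest ih =>
    rw [List.foldl_cons, ih, List.map_map]
    apply List.map_congr_left
    intro kl _
    simp only [Function.comp]
    cases h : pvLookup ra.2 kl.1 with
    | none => simp [pvLines_cons, h]
    | some ami => simp [pvLines_cons, h]

-- ===== VERDICT (by name: the statement is the Claim_ definition above) =====
theorem convert_json_to_txt_spec : Claim_equal_convert_json_to_txt := by
  intro amis_json _
  unfold Spec_convert_json_to_txt convert_json_to_txt convert_json_to_txt_alt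
  rw [pvA_outer, pvB_fold, List.map_map, List.map_map]
  simp [Function.comp_def, String.append_assoc]
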